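-- pv_equiv track=rewrite | github.com/felipemarinho97/online-judge-exercices | Python/8/1, 2, 3/1,-2,-3.py | tem123plus
-- ===== SOURCE A (Python) =====
-- def tem123plus(l):
-- 	key1 = False
-- 	key2 = False
-- 	for i in range(len(l)):
-- 		if l[i] == 1 and not key1:
-- 			key1 = True
-- 			indice = i
-- 		if l[i] == 2 and key1:
-- 			key2 = True
-- 		if l[i] == 3 and key2:
-- 			return indice
-- 	return -1
-- ===== SOURCE B (Python) =====
-- def tem123plus(l):
--     try:
--         i1 = l.index(1)
--         i2 = l.index(2, i1)
--         l.index(3, i2)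
--         return i1
--     except ValueError:
--         return -1
-- ===== Notes on version B (the rewrite author's own statement) =====
-- stated objective: simpler
-- what changed: Replaces the flag-driven single pass (key1/key2 state machine) by three sequential list.index searches with start offsets (find the first 1, then a 2 at or after it, then a 3 at or after that), returning the first 1's index, with ValueError mapped to -1.
import Mathlib
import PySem

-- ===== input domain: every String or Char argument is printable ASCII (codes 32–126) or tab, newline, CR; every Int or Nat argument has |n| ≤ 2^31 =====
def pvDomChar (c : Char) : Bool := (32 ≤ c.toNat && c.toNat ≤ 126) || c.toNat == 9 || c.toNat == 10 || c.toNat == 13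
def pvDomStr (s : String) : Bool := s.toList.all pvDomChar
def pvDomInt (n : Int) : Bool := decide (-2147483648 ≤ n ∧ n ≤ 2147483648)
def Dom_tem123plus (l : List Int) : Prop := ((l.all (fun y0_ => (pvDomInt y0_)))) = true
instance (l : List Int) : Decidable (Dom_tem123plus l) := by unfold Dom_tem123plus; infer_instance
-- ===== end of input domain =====

-- B replaces A's flag-driven single pass by three sequential index searches (find 1, then 2 after it, then 3 after that): simpler decomposition, same result.


-- ===== PORT A =====
-- the loop over range(len(l)); i is the current index, (key1, key2, indice) the loop state
-- (indice starts as a dummy 0: A never reads it before the 'l[i] == 1' branch has set it)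
def tem123plusLoop : List Int → Int → Bool → Bool → Int → Int
  | [], _, _, _, _ => -1
  | x :: xs, i, key1, key2, indice =>
    let key1' := if x = 1 ∧ key1 = false then true else key1
    let indice' := if x = 1 ∧ key1 = false then i else indice
    let key2' := if x = 2 ∧ key1' = true then true else key2
    if x = 3 ∧ key2' = true then indice' else tem123plusLoop xs (i + 1) key1' key2' indice'

def tem123plus (l : List Int) : Int := tem123plusLoop l 0 false false 0

-- ===== PORT B =====
-- l.index(v, start): search from position start, result an absolute index (exact for 0 ≤ start ≤ len(l))
def pyIndexFrom (l : List Int) (v : Int) (start : Nat) : Option Nat :=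
  (PySem.List.index? (l.drop start) v).map (· + start)

-- try: i1 = l.index(1); i2 = l.index(2, i1); l.index(3, i2); return i1  except ValueError: return -1
def tem123plus_alt (l : List Int) : Int :=
  match PySem.List.index? l 1 with
  | none => -1
  | some i1 =>
    match pyIndexFrom l 2 i1 with
    | none => -1
    | some i2 =>
      match pyIndexFrom l 3 i2 with
      | none => -1
      | some _ => (i1 : Int)

-- ===== PRECONDITION & SPEC =====
def Spec_tem123plus (l : List Int) (out : Int) : Prop := out = tem123plus_alt l
instance (l : List Int) (out : Int) : Decidable (Spec_tem123plus l out) := by unfold Spec_tem123plus; infer_instance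

-- ===== CLAIM (what is proved, stated in full; the proofs are below) =====
def Claim_equal_tem123plus : Prop := ∀ (l : List Int), Dom_tem123plus l → Spec_tem123plus l (tem123plus l)

-- ===== LEMMAS AND PROOFS =====

-- state (true, true): only the 'return on 3' branch can fire, the state never changes again
theorem loop_true_true (xs : List Int) (i ind : Int) :
    tem123plusLoop xs i true true ind = if 3 ∈ xs then ind else -1 := by
  induction xs generalizing i with
  | nil => simp [tem123plusLoop]
  | cons x xs ih =>
    by_cases hx : x = 3
    · simp [tem123plusLoop, hx]
    · have h3x : (3 : Int) ≠ x := fun h => hx h.symm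
      simp [tem123plusLoop, hx, ih, h3x]

-- state (true, false): looking for a 2, then a 3 after it
theorem loop_true_false (xs : List Int) (i ind : Int) :
    tem123plusLoop xs i true false ind =
      match PySem.List.index? xs 2 with
      | none => -1
      | some j => if 3 ∈ xs.drop j then ind else -1 := by
  induction xs generalizing i with
  | nil => simp [tem123plusLoop, PySem.List.index?]
  | cons x xs ih =>
    by_cases hx : x = 2
    · subst hx
      rw [PySem.List.index?_cons_self]
      simp [tem123plusLoop, loop_true_true]
    · rw [PySem.List.index?_cons_of_ne xs hx]
      cases h : PySem.List.index? xs 2 with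
      | none =>
        simp only [PySem.List.index?_eq_idxOf?] at h
        simp [tem123plusLoop, hx, ih, h]
      | some j =>
        simp only [PySem.List.index?_eq_idxOf?] at h
        simp [tem123plusLoop, hx, ih, h]

-- state (false, false): looking for a 1, then a 2, then a 3
theorem loop_false_false (xs : List Int) (i ind : Int) :
    tem123plusLoop xs i false false ind =
      match PySem.List.index? xs 1 with
      | none => -1
      | some i1 =>
        match PySem.List.index? (xs.drop i1) 2 with
        | none => -1
        | some j2 => if 3 ∈ xs.drop (i1 + j2) then i + i1 else -1 := by
  induction xs generalizing i with
  | nil => simp [tem123plusLoop, PySem.List.index?]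
  | cons x xs ih =>
    by_cases hx : x = 1
    · subst hx
      rw [PySem.List.index?_cons_self]
      simp only [List.drop_zero, Nat.zero_add, Nat.cast_zero, add_zero]
      rw [PySem.List.index?_cons_of_ne xs (by decide)]
      cases h : PySem.List.index? xs 2 with
      | none =>
        simp only [PySem.List.index?_eq_idxOf?] at h
        simp [tem123plusLoop, loop_true_false, h]
      | some j =>
        simp only [PySem.List.index?_eq_idxOf?] at h
        simp [tem123plusLoop, loop_true_false, h, List.drop_succ_cons]
    · rw [PySem.List.index?_cons_of_ne xs hx]
      cases h : PySem.List.index? xs 1 with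
      | none =>
        simp only [PySem.List.index?_eq_idxOf?] at h
        simp [tem123plusLoop, hx, ih, h]
      | some i1 =>
        cases h2 : PySem.List.index? (xs.drop i1) 2 with
        | none =>
          simp only [PySem.List.index?_eq_idxOf?] at h h2
          simp [tem123plusLoop, hx, ih, h, h2]
        | some j2 =>
          simp only [PySem.List.index?_eq_idxOf?] at h h2
          have e : tem123plusLoop (x :: xs) i false false ind
              = tem123plusLoop xs (i + 1) false false ind := by
            simp [tem123plusLoop, hx]
          rw [e, ih]
          simp only [PySem.List.index?_eq_idxOf?, h, h2, Option.map_some,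
            List.drop_succ_cons]
          have hd : List.drop (i1 + 1 + j2) (x :: xs) = List.drop (i1 + j2) xs := by
            have : i1 + 1 + j2 = (i1 + j2) + 1 := by omega
            rw [this, List.drop_succ_cons]
          have hv : i + 1 + (i1 : Int) = i + ((i1 : Nat) + 1 : Nat) := by push_cast; ring
          rw [hd, hv]

-- ===== VERDICT (by name: the statement is the Claim_ definition above) =====
theorem tem123plus_spec : Claim_equal_tem123plus := by
  intro l _
  show tem123plus l = tem123plus_alt l
  unfold tem123plus tem123plus_alt pyIndexFrom
  rw [loop_false_false]
  cases h1 : PySem.List.index? l 1 with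
  | none => rfl
  | some i1 =>
    simp only [PySem.List.index?_eq_idxOf?] at h1
    simp only [h1]
    cases h2 : PySem.List.index? (l.drop i1) 2 with
    | none =>
      simp only [PySem.List.index?_eq_idxOf?] at h2
      simp [h2]
    | some j2 =>
      simp only [PySem.List.index?_eq_idxOf?] at h2
      simp only [h2, Option.map_some]
      cases h3 : PySem.List.index? (l.drop (j2 + i1)) 3 with
      | none =>
        have hmem : (3 : Int) ∉ l.drop (i1 + j2) := by
          rw [Nat.add_comm, ← PySem.List.index?_eq_none_iff, h3]
        simp only [PySem.List.index?_eq_idxOf?] at h3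
        simp [h3, hmem]
      | some k =>
        have hmem : (3 : Int) ∈ l.drop (i1 + j2) := by
          rw [Nat.add_comm, ← PySem.List.index?_isSome_iff, h3]; rfl
        simp only [PySem.List.index?_eq_idxOf?] at h3
        simp [h3, hmem]
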